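-- pv_equiv track=rewrite | github.com/Arkadiy-Garber/BagOfTricks | cytoscan.py | checkGACE
-- ===== SOURCE A (Python) =====
-- def checkGACE(ls):
--     count = 0
--     uniqueLS = []
--     for i in ls:
--         hmm = i.split("|")[0]
--         if hmm not in uniqueLS:
--             uniqueLS.append(hmm)
--             if hmm in ["GACE_1843", "GACE_1844", "GACE_1845", "GACE_1846", "GACE_1847"]:
--                 count += 1
--     return count
-- ===== SOURCE B (Python) =====
-- def checkGACE(ls):
--     targets = ("GACE_1843", "GACE_1844", "GACE_1845", "GACE_1846", "GACE_1847")
--     return sum(1 for g in targets if any(x.split("|")[0] == g for x in ls))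
-- ===== Notes on version B (the rewrite author's own statement) =====
-- stated objective: faster
-- what changed: Inverts the iteration: instead of a single accumulating pass over ls maintaining a dedup list with linear membership scans, B loops over the five constant GACE ids and counts those occurring as a prefix anywhere in ls (one any() scan per id); the dedup structure disappears because each id is counted at most once by construction.
import Mathlib
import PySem

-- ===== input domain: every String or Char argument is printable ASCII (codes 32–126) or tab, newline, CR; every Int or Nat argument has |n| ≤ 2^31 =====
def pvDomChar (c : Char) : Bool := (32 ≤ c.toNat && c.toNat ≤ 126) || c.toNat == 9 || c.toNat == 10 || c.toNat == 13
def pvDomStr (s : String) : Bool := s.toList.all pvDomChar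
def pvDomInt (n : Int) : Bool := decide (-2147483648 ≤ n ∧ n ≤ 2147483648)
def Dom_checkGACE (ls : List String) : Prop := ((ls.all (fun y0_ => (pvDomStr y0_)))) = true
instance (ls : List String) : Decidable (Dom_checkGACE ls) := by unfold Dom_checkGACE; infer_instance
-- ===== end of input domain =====

-- B inverts the iteration: instead of A's single accumulating pass over ls with a dedup
-- list, B loops over the five constant GACE ids and counts those occurring as a prefix in ls.

-- x.split("|")[0]: split? with a nonempty separator always returns some nonempty list,
-- so getD [] / headD "" are exact for Python's [0] here.
def pvPrefix (x : String) : String := ((PySem.Str.split? x "|").getD []).headD ""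

-- ===== PORT A =====
def checkGACE (ls : List String) : Int :=
  let st := ls.foldl (fun (st : Int × List String) i =>
      let hmm := pvPrefix i
      if ¬ st.2.contains hmm then
        let uniqueLS := st.2 ++ [hmm]
        if ["GACE_1843", "GACE_1844", "GACE_1845", "GACE_1846", "GACE_1847"].contains hmm then
          (st.1 + 1, uniqueLS)
        else (st.1, uniqueLS)
      else st) (0, [])
  st.1

-- ===== PORT B =====
-- sum(1 for g in targets if any(x.split("|")[0] == g for x in ls))
def checkGACE_alt (ls : List String) : Int :=
  ((["GACE_1843", "GACE_1844", "GACE_1845", "GACE_1846", "GACE_1847"].countP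
      (fun g => ls.any (fun x => pvPrefix x == g)) : Nat) : Int)

-- ===== PRECONDITION & SPEC =====
def Spec_checkGACE (ls : List String) (out : Int) : Prop := out = checkGACE_alt ls
instance (ls : List String) (out : Int) : Decidable (Spec_checkGACE ls out) := by unfold Spec_checkGACE; infer_instance

-- ===== CLAIM =====
def Claim_equal_checkGACE : Prop := ∀ (ls : List String), Dom_checkGACE ls → Spec_checkGACE ls (checkGACE ls)

-- ===== LEMMAS AND PROOFS =====

def pvGace : List String := ["GACE_1843", "GACE_1844", "GACE_1845", "GACE_1846", "GACE_1847"]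

def pvCnt (u : List String) : Int := ((u.filter (fun x => pvGace.contains x)).length : Int)

def pvStep (st : Int × List String) (i : String) : Int × List String :=
  let hmm := pvPrefix i
  if ¬ st.2.contains hmm then
    let uniqueLS := st.2 ++ [hmm]
    if pvGace.contains hmm then (st.1 + 1, uniqueLS) else (st.1, uniqueLS)
  else st

lemma pvStep_eq (u : List String) (i : String) :
    pvStep (pvCnt u, u) i = (pvCnt (PySem.Set.add u (pvPrefix i)), PySem.Set.add u (pvPrefix i)) := by
  by_cases h : pvPrefix i ∈ u
  · simp [pvStep, PySem.Set.add, h]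
  · by_cases hg : pvPrefix i ∈ pvGace
    · simp [pvStep, PySem.Set.add, pvCnt, List.filter_append, h, hg]
    · simp [pvStep, PySem.Set.add, pvCnt, List.filter_append, h, hg]

lemma pvFold_inv (ls : List String) (u : List String) :
    ls.foldl pvStep (pvCnt u, u) =
      (pvCnt ((ls.map pvPrefix).foldl PySem.Set.add u),
       (ls.map pvPrefix).foldl PySem.Set.add u) := by
  induction ls generalizing u with
  | nil => rfl
  | cons a t ih =>
    simp only [List.foldl_cons, List.map_cons, pvStep_eq]
    exact ih (PySem.Set.add u (pvPrefix a))

-- counting u ∩ gace by scanning u equals counting it by scanning gace, when both are nodup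
lemma pvSymCount (u g : List String) (hu : u.Nodup) (hg : g.Nodup) :
    (u.filter (fun x => decide (x ∈ g))).length = (g.filter (fun x => decide (x ∈ u))).length := by
  have key : ∀ (a b : List String), a.Nodup → b.Nodup →
      (a.filter (fun x => decide (x ∈ b))).length = (a.toFinset ∩ b.toFinset).card := by
    intro a b ha hb
    have h1 : (a.filter (fun x => decide (x ∈ b))).toFinset.card
        = (a.filter (fun x => decide (x ∈ b))).length :=
      List.toFinset_card_of_nodup (ha.filter _)
    rw [← h1, List.toFinset_filter]
    congr 1
    ext x
    simp [Finset.mem_filter, List.mem_toFinset]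
  rw [key u g hu hg, key g u hg hu, Finset.inter_comm]

lemma pvCnt_eq_countP (v : List String) (hv : v.Nodup) :
    pvCnt v = ((pvGace.countP (fun g => v.contains g) : Nat) : Int) := by
  have hg : pvGace.Nodup := by decide
  simp only [pvCnt, List.countP_eq_length_filter, List.contains_eq_mem]
  exact_mod_cast pvSymCount v pvGace hv hg

-- ===== VERDICT =====
theorem checkGACE_spec : Claim_equal_checkGACE := by
  intro ls _
  show checkGACE ls = checkGACE_alt ls
  have hfold : ls.foldl pvStep (0, []) =
      (pvCnt ((ls.map pvPrefix).foldl PySem.Set.add []),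
       (ls.map pvPrefix).foldl PySem.Set.add []) := pvFold_inv ls []
  have hA : checkGACE ls = (ls.foldl pvStep (0, [])).1 := rfl
  rw [hA, hfold]
  set v := (ls.map pvPrefix).foldl PySem.Set.add [] with hv
  have hvset : v = PySem.Set.ofList (ls.map pvPrefix) := by
    rw [PySem.Set.ofList_eq_foldl]
  have hnd : v.Nodup := by rw [hvset]; exact PySem.Set.nodup_ofList _
  rw [pvCnt_eq_countP v hnd]
  show ((pvGace.countP (fun g => v.contains g) : Nat) : Int) = checkGACE_alt ls
  unfold checkGACE_alt
  congr 1
  apply List.countP_congr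
  intro g _
  simp only [hvset, PySem.Set.contains, List.contains_iff_mem, PySem.Set.mem_ofList,
    List.mem_map, List.any_eq_true, beq_iff_eq]
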